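-- pv_equiv track=rewrite | github.com/aleksandarbos/codility-training-solved-tasks-python | l10_e01_v00.py | solution
-- ===== SOURCE A (Python) =====
-- def solution(n):
--     coins = [0] * (n+1)
--     flip_cnt = 0
--
--     for i in range(1, n):  # O(n)
--         k = i
--         while k <= n:  # O(sqrt(n))
--             if k % i == 0:
--                 coins[k] = (coins[k] + 1) % 2
--                 k += i
--         flip_cnt += coins[i]
--
--     return flip_cnt
-- ===== SOURCE B (Python) =====
-- def solution(n):
--     # count j >= 1 with j*j <= n-1 (the coins left face-up are exactly the
--     # perfect-square positions 1..n-1)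
--     c = 0
--     j = 1
--     while j * j < n:
--         c += 1
--         j += 1
--     return c
-- ===== Notes on version B (the rewrite author's own statement) =====
-- stated objective: faster
-- what changed: B replaces A's O(n log n) sieve-like simulation of the divisor flips (an (n+1)-element coin array toggled at every multiple of every i < n) by directly counting the positions left face-up, which are exactly the perfect squares 1..n-1, with a single O(sqrt n) counting loop and no array.
import Mathlib
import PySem

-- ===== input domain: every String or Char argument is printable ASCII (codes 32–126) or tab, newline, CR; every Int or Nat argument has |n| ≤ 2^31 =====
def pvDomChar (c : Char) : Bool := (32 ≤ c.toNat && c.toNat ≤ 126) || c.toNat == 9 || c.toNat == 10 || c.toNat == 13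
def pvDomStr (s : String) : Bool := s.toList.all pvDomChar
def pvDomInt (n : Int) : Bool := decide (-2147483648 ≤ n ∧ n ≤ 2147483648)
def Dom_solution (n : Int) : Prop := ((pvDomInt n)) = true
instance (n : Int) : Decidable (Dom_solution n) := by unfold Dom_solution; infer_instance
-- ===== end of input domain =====

-- B replaces A's divisor-flip simulation by directly counting the face-up
-- (perfect-square) positions 1..n-1; return values are equal for every n.

-- ===== PORT A =====
-- inner 'while k <= n' loop of A; it is only ever called with 1 ≤ i and i ∣ k,
-- so the '1 ≤ i' conjunct (termination guard only) and the 'else coins' branch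
-- (where Python would loop forever — unreachable since i ∣ k) never matter.
def innerA (i n : Int) (coins : List Int) (k : Int) : List Int :=
  if _h : k ≤ n ∧ 1 ≤ i then
    if PySem.Int.mod k i == 0 then
      innerA i n (coins.set k.toNat (PySem.Int.mod (PySem.List.pyGetD coins k 0 + 1) 2)) (k + i)
    else coins
  else coins
termination_by (n + 1 - k).toNat
decreasing_by omega

def solution (n : Int) : Int :=
  -- coins = [0] * (n+1); for i in range(1, n): <inner while>; flip_cnt += coins[i]
  let coins : List Int := List.replicate (n + 1).toNat 0
  let st := (PySem.List.pyRange 1 n).foldl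
    (fun (st : List Int × Int) i =>
      let coins' := innerA i n st.1 i
      (coins', st.2 + PySem.List.pyGetD coins' i 0))
    (coins, 0)
  st.2

-- ===== PORT B =====
-- c = 0; j = 1; while j * j < n: c += 1; j += 1; return c
def altLoop (n c j : Int) : Int :=
  if j * j < n then altLoop n (c + 1) (j + 1) else c
termination_by (n - j).toNat
decreasing_by
  rename_i h
  have : j < n := by nlinarith
  omega

def solution_alt (n : Int) : Int := altLoop n 0 1

-- ===== PRECONDITION & SPEC =====
def Spec_solution (n : Int) (out : Int) : Prop := out = solution_alt n
instance (n : Int) (out : Int) : Decidable (Spec_solution n out) := by unfold Spec_solution; infer_instance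

-- ===== CLAIM (what is proved, stated in full; the proofs are below) =====
def Claim_equal_solution : Prop := ∀ (n : Int), Dom_solution n → Spec_solution n (solution n)

-- ===== LEMMAS AND PROOFS =====

-- number of divisors of m lying in [1, t]
def divUpTo (t m : Nat) : Nat := ((Finset.range t).filter (fun d => (d + 1) ∣ m)).card

lemma getD_set' (l : List Int) (a m : Nat) (v : Int) :
    (l.set a v).getD m 0 = if a = m ∧ m < l.length then v else l.getD m 0 := by
  rcases Decidable.em (m < l.length) with h | h
  · simp [List.getD_eq_getElem?_getD, List.getElem?_set]
    split_ifs <;> simp_all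
  · have h' : ¬ m < (l.set a v).length := by simpa using h
    rw [List.getD_eq_getElem?_getD, List.getD_eq_getElem?_getD,
      List.getElem?_eq_none (by omega), List.getElem?_eq_none (by omega)]
    simp
    omega

lemma innerA_length (i n : Int) (coins : List Int) (k : Int) :
    (innerA i n coins k).length = coins.length := by
  fun_induction innerA with
  | case1 coins k h hmod ih => rw [ih]; simp
  | case2 => rfl
  | case3 => rfl

lemma innerA_getD (i n : Int) (coins : List Int) (k : Int)
    (hi : 1 ≤ i) (hk1 : 1 ≤ k) (hdvd : i ∣ k)
    (hlen : (coins.length : Int) = n + 1) (m : Nat) :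
    (innerA i n coins k).getD m 0 =
      if k ≤ (m : Int) ∧ (m : Int) ≤ n ∧ i ∣ (m : Int) then
        PySem.Int.mod (coins.getD m 0 + 1) 2
      else coins.getD m 0 := by
  rw [innerA]
  by_cases hkn : k ≤ n
  · have hc : k ≤ n ∧ 1 ≤ i := ⟨hkn, hi⟩
    rw [dif_pos hc, if_pos (by simpa [beq_iff_eq, PySem.Int.mod_eq_zero_iff_dvd] using hdvd)]
    rw [innerA_getD i n _ (k + i) hi (by omega) (Dvd.dvd.add hdvd dvd_rfl) (by simpa using hlen) m]
    rw [PySem.List.pyGetD_of_nonneg coins 0 (by omega), getD_set']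
    by_cases hmk : (m : Int) = k
    · have h1 : ¬ (k + i ≤ (m : Int) ∧ (m : Int) ≤ n ∧ i ∣ (m : Int)) := by omega
      have h2 : k ≤ (m : Int) ∧ (m : Int) ≤ n ∧ i ∣ (m : Int) := ⟨by omega, by omega, hmk ▸ hdvd⟩
      have h3 : k.toNat = m ∧ m < coins.length := by omega
      rw [if_neg h1, if_pos h3, if_pos h2, h3.1]
    · have h3 : ¬ (k.toNat = m ∧ m < coins.length) := by omega
      rw [if_neg h3]
      by_cases h1 : i ∣ (m : Int)
      · by_cases h2 : k ≤ (m : Int) ∧ (m : Int) ≤ n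
        · have : i ∣ (m : Int) - k := h1.sub hdvd
          have : i ≤ (m : Int) - k := Int.le_of_dvd (by omega) this
          rw [if_pos ⟨by omega, h2.2, h1⟩, if_pos ⟨h2.1, h2.2, h1⟩]
        · rw [if_neg (by omega), if_neg (by omega)]
      · rw [if_neg (by tauto), if_neg (by tauto)]
  · rw [dif_neg (by omega), if_neg (by omega)]
termination_by (n + 1 - k).toNat
decreasing_by omega

lemma divUpTo_succ (t m : Nat) :
    divUpTo (t + 1) m = divUpTo t m + if (t + 1) ∣ m then 1 else 0 := by
  unfold divUpTo
  rw [Finset.range_add_one, Finset.filter_insert]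
  split_ifs with h
  · rw [Finset.card_insert_of_notMem (by simp)]
  · rfl

-- the fold in `solution`, one iteration of the for-loop
def stepF (n : Int) (st : List Int × Int) (i : Int) : List Int × Int :=
  let coins' := innerA i n st.1 i
  (coins', st.2 + PySem.List.pyGetD coins' i 0)

-- state of the fold in `solution` after the first t iterations (i = 1..t)
lemma fold_inv (n : Int) (t : Nat) (ht : (t : Int) ≤ n - 1) :
    ((PySem.List.pyRange 1 ((t : Int) + 1)).foldl (stepF n)
        (List.replicate (n + 1).toNat 0, 0)).1.length = (n + 1).toNat ∧
    (∀ m : Nat, 1 ≤ m → (m : Int) ≤ n →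
      ((PySem.List.pyRange 1 ((t : Int) + 1)).foldl (stepF n)
        (List.replicate (n + 1).toNat 0, 0)).1.getD m 0 = ((divUpTo t m % 2 : Nat) : Int)) ∧
    ((PySem.List.pyRange 1 ((t : Int) + 1)).foldl (stepF n)
        (List.replicate (n + 1).toNat 0, 0)).2 =
      ((List.range t).map (fun i => ((divUpTo (i + 1) (i + 1) % 2 : Nat) : Int))).sum := by
  induction t with
  | zero =>
    have h0 : PySem.List.pyRange 1 (((0 : Nat) : Int) + 1) = ([] : List Int) := by decide
    rw [h0]
    refine ⟨by simp, fun m h1 h2 => ?_, by simp⟩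
    simp only [List.foldl_nil, divUpTo]
    simp [List.getD_eq_getElem?_getD, List.getElem?_replicate]
    rw [if_pos h2]
    rfl
  | succ t IH =>
    have hn2 : 2 ≤ n := by omega
    have ht' : (t : Int) ≤ n - 1 := by push_cast at ht ⊢; omega
    obtain ⟨L, G, S⟩ := IH ht'
    have hcast : (((t + 1 : Nat)) : Int) + 1 = ((t : Int) + 1) + 1 := by push_cast; ring
    rw [hcast, PySem.List.pyRange_one_succ_right (by omega), List.foldl_append]
    rcases hE : (PySem.List.pyRange 1 ((t : Int) + 1)).foldl (stepF n)
        (List.replicate (n + 1).toNat 0, 0) with ⟨C, F⟩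

    rw [hE] at L G S
    simp only at L G S
    have hlenC : ((C.length : Nat) : Int) = n + 1 := by rw [L]; omega
    -- characterization of the coins list after processing i = t+1
    have hG' : ∀ m : Nat, 1 ≤ m → (m : Int) ≤ n →
        (innerA ((t : Int) + 1) n C ((t : Int) + 1)).getD m 0 = ((divUpTo (t + 1) m % 2 : Nat) : Int) := by
      intro m hm1 hmn
      rw [innerA_getD ((t : Int) + 1) n C ((t : Int) + 1) (by omega) (by omega) dvd_rfl hlenC m]
      rw [divUpTo_succ]
      by_cases hd : (t + 1) ∣ m
      · have hdle : t + 1 ≤ m := Nat.le_of_dvd (by omega) hd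
        have hdi : ((t : Int) + 1) ∣ (m : Int) := by
          have := Int.natCast_dvd_natCast.mpr hd
          push_cast at this
          exact this
        rw [if_pos ⟨by omega, hmn, hdi⟩, G m hm1 hmn, if_pos hd,
          PySem.Int.mod_eq_emod_of_pos (by norm_num)]
        omega
      · have hdi : ¬ ((t : Int) + 1) ∣ (m : Int) := by
          intro hc
          apply hd
          have : ((t + 1 : Nat) : Int) ∣ (m : Int) := by push_cast; convert hc using 1
          exact_mod_cast this
        rw [if_neg (by tauto), G m hm1 hmn, if_neg hd, Nat.add_zero]
    refine ⟨?_, ?_, ?_⟩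
    · simp only [List.foldl_cons, List.foldl_nil, stepF, innerA_length]
      exact L
    · intro m hm1 hmn
      simp only [List.foldl_cons, List.foldl_nil, stepF]
      exact hG' m hm1 hmn
    · simp only [List.foldl_cons, List.foldl_nil, stepF]
      rw [PySem.List.pyGetD_of_nonneg _ 0 (by omega)]
      have h1 : ((t : Int) + 1).toNat = t + 1 := by omega
      rw [h1, S, hG' (t + 1) (by omega) (by omega), List.range_succ]
      simp

-- parity of the divisor count: odd exactly at perfect squares
lemma divUpTo_parity (x : Nat) (hx : 1 ≤ x) :
    divUpTo x x % 2 = if Nat.sqrt x * Nat.sqrt x = x then 1 else 0 := by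
  have hsplit : divUpTo x x =
      (((Finset.range x).filter (fun d => (d + 1) ∣ x)).filter
          (fun d => (d + 1) * (d + 1) < x)).card +
      ((((Finset.range x).filter (fun d => (d + 1) ∣ x)).filter
          (fun d => (d + 1) * (d + 1) = x)).card +
        (((Finset.range x).filter (fun d => (d + 1) ∣ x)).filter
          (fun d => x < (d + 1) * (d + 1))).card) := by
    unfold divUpTo
    rw [← Finset.card_filter_add_card_filter_not
      (s := (Finset.range x).filter (fun d => (d + 1) ∣ x))
      (p := fun d => (d + 1) * (d + 1) < x)]
    congr 1
    rw [← Finset.card_filter_add_card_filter_not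
      (s := ((Finset.range x).filter (fun d => (d + 1) ∣ x)).filter
        (fun d => ¬ (d + 1) * (d + 1) < x))
      (p := fun d => (d + 1) * (d + 1) = x)]
    congr 1
    · congr 1
      ext d
      simp only [Finset.mem_filter, Finset.mem_range]
      constructor
      · rintro ⟨⟨⟨h1, h2⟩, h3⟩, h4⟩
        exact ⟨⟨h1, h2⟩, h4⟩
      · rintro ⟨⟨h1, h2⟩, h4⟩
        exact ⟨⟨⟨h1, h2⟩, by omega⟩, h4⟩
    · congr 1
      ext d
      simp only [Finset.mem_filter, Finset.mem_range]
      constructor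
      · rintro ⟨⟨⟨h1, h2⟩, h3⟩, h4⟩
        exact ⟨⟨h1, h2⟩, by omega⟩
      · rintro ⟨⟨h1, h2⟩, h4⟩
        exact ⟨⟨⟨h1, h2⟩, by omega⟩, by omega⟩
  have hbij : (((Finset.range x).filter (fun d => (d + 1) ∣ x)).filter
          (fun d => (d + 1) * (d + 1) < x)).card =
      (((Finset.range x).filter (fun d => (d + 1) ∣ x)).filter
          (fun d => x < (d + 1) * (d + 1))).card := by
    apply Finset.card_bij' (i := fun d _ => x / (d + 1) - 1) (j := fun e _ => x / (e + 1) - 1)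
    · intro d hd
      simp only [Finset.mem_filter, Finset.mem_range] at hd ⊢
      obtain ⟨⟨hdx, hdvd⟩, hlt⟩ := hd
      have hq : (x / (d + 1)) * (d + 1) = x := Nat.div_mul_cancel hdvd
      have hq1 : 1 ≤ x / (d + 1) := by
        rcases Nat.eq_zero_or_pos (x / (d + 1)) with h | h
        · rw [h] at hq; omega
        · exact h
      have hqe : x / (d + 1) - 1 + 1 = x / (d + 1) := by omega
      refine ⟨⟨by have := Nat.div_le_self x (d + 1); omega, ?_⟩, ?_⟩
      · rw [hqe]; exact Nat.div_dvd_of_dvd hdvd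
      · rw [hqe]
        have hlt2 : d + 1 < x / (d + 1) := by nlinarith
        nlinarith
    · intro e he
      simp only [Finset.mem_filter, Finset.mem_range] at he ⊢
      obtain ⟨⟨hex, hdvd⟩, hgt⟩ := he
      have hq : (x / (e + 1)) * (e + 1) = x := Nat.div_mul_cancel hdvd
      have hq1 : 1 ≤ x / (e + 1) := by
        rcases Nat.eq_zero_or_pos (x / (e + 1)) with h | h
        · rw [h] at hq; omega
        · exact h
      have hqe : x / (e + 1) - 1 + 1 = x / (e + 1) := by omega
      refine ⟨⟨by have := Nat.div_le_self x (e + 1); omega, ?_⟩, ?_⟩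
      · rw [hqe]; exact Nat.div_dvd_of_dvd hdvd
      · rw [hqe]
        have hlt2 : x / (e + 1) < e + 1 := by nlinarith
        nlinarith
    · intro d hd
      simp only [Finset.mem_filter, Finset.mem_range] at hd
      obtain ⟨⟨hdx, hdvd⟩, hlt⟩ := hd
      have hq : (x / (d + 1)) * (d + 1) = x := Nat.div_mul_cancel hdvd
      have hq1 : 1 ≤ x / (d + 1) := by
        rcases Nat.eq_zero_or_pos (x / (d + 1)) with h | h
        · rw [h] at hq; omega
        · exact h
      have hqe : x / (d + 1) - 1 + 1 = x / (d + 1) := by omega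
      rw [hqe, Nat.div_div_self hdvd (by omega)]
      omega
    · intro e he
      simp only [Finset.mem_filter, Finset.mem_range] at he
      obtain ⟨⟨hex, hdvd⟩, hgt⟩ := he
      have hq : (x / (e + 1)) * (e + 1) = x := Nat.div_mul_cancel hdvd
      have hq1 : 1 ≤ x / (e + 1) := by
        rcases Nat.eq_zero_or_pos (x / (e + 1)) with h | h
        · rw [h] at hq; omega
        · exact h
      have hqe : x / (e + 1) - 1 + 1 = x / (e + 1) := by omega
      rw [hqe, Nat.div_div_self hdvd (by omega)]
      omega
  have heq : (((Finset.range x).filter (fun d => (d + 1) ∣ x)).filter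
          (fun d => (d + 1) * (d + 1) = x)).card =
      if Nat.sqrt x * Nat.sqrt x = x then 1 else 0 := by
    split_ifs with h
    · have hr1 : 1 ≤ Nat.sqrt x := by
        rcases Nat.eq_zero_or_pos (Nat.sqrt x) with h0 | h0
        · rw [h0] at h; omega
        · exact h0
      have : ((Finset.range x).filter (fun d => (d + 1) ∣ x)).filter
          (fun d => (d + 1) * (d + 1) = x) = {Nat.sqrt x - 1} := by
        ext d
        simp only [Finset.mem_filter, Finset.mem_range, Finset.mem_singleton]
        constructor
        · rintro ⟨_, hsq⟩
          have : d + 1 = Nat.sqrt x := by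
            have := Nat.mul_self_inj (n := d + 1) (m := Nat.sqrt x)
            omega
          omega
        · intro hd
          have hde : d + 1 = Nat.sqrt x := by omega
          refine ⟨⟨by nlinarith, ?_⟩, by rw [hde]; exact h⟩
          exact ⟨Nat.sqrt x, by rw [hde]; exact h.symm⟩
      rw [this, Finset.card_singleton]
    · rw [Finset.card_eq_zero, Finset.filter_eq_empty_iff]
      intro d _ hsq
      apply h
      have : Nat.sqrt x = d + 1 := by rw [← hsq, Nat.sqrt_eq]
      rw [this]
      exact hsq
  have hle : (if Nat.sqrt x * Nat.sqrt x = x then 1 else 0) ≤ 1 := by split_ifs <;> omega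
  omega

lemma sqrt_succ_step (m : Nat) :
    Nat.sqrt (m + 1) =
      Nat.sqrt m + (if Nat.sqrt (m + 1) * Nat.sqrt (m + 1) = m + 1 then 1 else 0) := by
  have hs : Nat.sqrt m ≤ Nat.sqrt (m + 1) := Nat.sqrt_le_sqrt (by omega)
  have h1 : Nat.sqrt (m + 1) ≤ Nat.sqrt m + 1 := by
    have h2 : m + 1 ≤ (Nat.sqrt m + 1) * (Nat.sqrt m + 1) := Nat.lt_succ_sqrt m
    calc Nat.sqrt (m + 1) ≤ Nat.sqrt ((Nat.sqrt m + 1) * (Nat.sqrt m + 1)) := Nat.sqrt_le_sqrt h2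
      _ = Nat.sqrt m + 1 := Nat.sqrt_eq _
  have ha : Nat.sqrt m * Nat.sqrt m ≤ m := Nat.sqrt_le m
  have hb : Nat.sqrt (m + 1) * Nat.sqrt (m + 1) ≤ m + 1 := Nat.sqrt_le (m + 1)
  have ha2 : m < (Nat.sqrt m + 1) * (Nat.sqrt m + 1) := Nat.lt_succ_sqrt m
  rcases (by omega : Nat.sqrt (m + 1) = Nat.sqrt m ∨ Nat.sqrt (m + 1) = Nat.sqrt m + 1)
    with he | he
  · rw [he] at hb ⊢
    rw [if_neg (by omega)]
    omega
  · rw [he] at hb ⊢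
    rw [if_pos (by omega)]

lemma sum_squares_count (t : Nat) :
    ((List.range t).map (fun i => ((divUpTo (i + 1) (i + 1) % 2 : Nat) : Int))).sum
      = (Nat.sqrt t : Int) := by
  induction t with
  | zero => simp
  | succ t IH =>
    rw [List.range_succ, List.map_append, List.sum_append, IH]
    simp only [List.map_cons, List.map_nil, List.sum_cons, List.sum_nil]
    rw [divUpTo_parity (t + 1) (by omega)]
    have hstep := sqrt_succ_step t
    by_cases hq : Nat.sqrt (t + 1) * Nat.sqrt (t + 1) = t + 1
    · rw [if_pos hq] at hstep ⊢
      rw [hstep]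
      push_cast
      ring
    · rw [if_neg hq] at hstep ⊢
      rw [hstep]
      push_cast
      ring

lemma solution_eq_sqrt (n : Int) : solution n = (Nat.sqrt (n - 1).toNat : Int) := by
  have hsol : solution n =
      ((PySem.List.pyRange 1 n).foldl (stepF n) (List.replicate (n + 1).toNat 0, 0)).2 := rfl
  by_cases hn : 2 ≤ n
  · have h2 := (fold_inv n (n - 1).toNat (by omega)).2.2
    rw [show (((n - 1).toNat : Int) + 1) = n by omega] at h2
    rw [hsol, h2, sum_squares_count]
  · rw [hsol, PySem.List.pyRange_one_eq_nil (by omega), List.foldl_nil]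
    have : (n - 1).toNat = 0 := by omega
    rw [this]
    simp [Nat.sqrt]

lemma altLoop_eq (n : Int) (c j : Int) (hj : 1 ≤ j) :
    altLoop n c j = c + ((Nat.sqrt (n - 1).toNat + 1 - j.toNat : Nat) : Int) := by
  rw [altLoop]
  split_ifs with h
  · rw [altLoop_eq n (c + 1) (j + 1) (by omega)]
    have hjle : j.toNat ≤ Nat.sqrt (n - 1).toNat := by
      apply Nat.le_sqrt.mpr
      have hjj : (j.toNat : Int) = j := by omega
      have : (j.toNat : Int) * (j.toNat : Int) ≤ ((n - 1).toNat : Int) := by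
        rw [hjj]
        omega
      exact_mod_cast this
    omega
  · have hlt : Nat.sqrt (n - 1).toNat < j.toNat := by
      by_contra hc
      push Not at hc
      have h2 : j.toNat * j.toNat ≤ (n - 1).toNat := Nat.le_sqrt.mp hc
      have h3 : (j.toNat : Int) * (j.toNat : Int) ≤ ((n - 1).toNat : Int) := by exact_mod_cast h2
      have h4 : ((n - 1).toNat : Int) ≤ max (n - 1) 0 := by omega
      have : j * j ≤ max (n - 1) 0 := by
        have hjj : (j.toNat : Int) = j := by omega
        rw [hjj] at h3
        omega
      have hj1 : 1 ≤ j * j := by nlinarith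
      omega
    have : Nat.sqrt (n - 1).toNat + 1 - j.toNat = 0 := by omega
    rw [this]
    simp
termination_by (n - j).toNat
decreasing_by
  have : j < n := by nlinarith
  omega

lemma solution_alt_eq_sqrt (n : Int) : solution_alt n = (Nat.sqrt (n - 1).toNat : Int) := by
  unfold solution_alt
  rw [altLoop_eq n 0 1 le_rfl]
  simp

-- ===== VERDICT (by name: the statement is the Claim_ definition above) =====
theorem solution_spec : Claim_equal_solution := by
  intro n _
  unfold Spec_solution
  rw [solution_eq_sqrt, solution_alt_eq_sqrt]
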